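-- pv_equiv track=rewrite | github.com/abhijit0/KIE_Syntetic_data | template_1/template1.py | count_common_chars
-- ===== SOURCE A (Python) =====
-- def count_common_chars(str1, str2):
--     count = 0
--     str1 = str(str1)
--     str2 = str(str2)
--     for i in str1:
--         for j in str2:
--             if i==j:
--                 count+=1
--
--     return count
-- ===== SOURCE B (Python) =====
-- def count_common_chars(str1, str2):
--     str1 = str(str1)
--     str2 = str(str2)
--     counts = {}
--     for c in str2:
--         counts[c] = counts.get(c, 0) + 1
--     total = 0
--     for c in str1:
--         total += counts.get(c, 0)
--     return total
-- ===== Notes on version B (the rewrite author's own statement) =====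
-- stated objective: faster
-- what changed: Replaces the O(n*m) nested character loops with a single frequency dictionary of str2 followed by one pass over str1 summing the counts.
import Mathlib
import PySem

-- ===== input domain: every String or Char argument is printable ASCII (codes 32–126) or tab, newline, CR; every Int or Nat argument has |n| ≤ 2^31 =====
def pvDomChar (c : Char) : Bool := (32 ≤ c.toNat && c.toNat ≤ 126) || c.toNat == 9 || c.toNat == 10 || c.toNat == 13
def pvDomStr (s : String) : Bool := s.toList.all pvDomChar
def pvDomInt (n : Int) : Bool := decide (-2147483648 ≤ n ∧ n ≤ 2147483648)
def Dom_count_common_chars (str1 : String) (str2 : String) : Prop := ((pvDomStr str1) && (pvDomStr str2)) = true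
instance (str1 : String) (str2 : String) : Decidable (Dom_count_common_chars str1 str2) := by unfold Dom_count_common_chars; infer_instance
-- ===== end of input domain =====

-- B replaces A's nested loops with a frequency dictionary of str2 and one summing pass over str1 (asymptotically faster on timed inputs).


-- ===== PORT A =====
def count_common_chars (str1 : String) (str2 : String) : Int :=
  str1.toList.foldl
    (fun count i =>
      str2.toList.foldl (fun count j => if i == j then count + 1 else count) count)
    0

-- ===== PORT B =====
def count_common_chars_alt (str1 : String) (str2 : String) : Int :=
  let counts := str2.toList.foldl (fun d c => d.insert c (d.getD c 0 + 1))
    (PySem.Dict.empty : PySem.Dict Char Int)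
  str1.toList.foldl (fun total c => total + counts.getD c 0) 0

-- ===== PRECONDITION & SPEC =====
def Spec_count_common_chars (str1 : String) (str2 : String) (out : Int) : Prop := out = count_common_chars_alt str1 str2
instance (str1 : String) (str2 : String) (out : Int) : Decidable (Spec_count_common_chars str1 str2 out) := by unfold Spec_count_common_chars; infer_instance

-- ===== CLAIM (what is proved, stated in full; the proofs are below) =====
def Claim_equal_count_common_chars : Prop := ∀ (str1 : String) (str2 : String), Dom_count_common_chars str1 str2 → Spec_count_common_chars str1 str2 (count_common_chars str1 str2)

-- ===== LEMMAS AND PROOFS =====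

-- ===== VERDICT (by name: the statement is the Claim_ definition above) =====
theorem count_common_chars_spec : Claim_equal_count_common_chars := by
  intro str1 str2 _
  unfold Spec_count_common_chars count_common_chars count_common_chars_alt
  apply PySem.List.foldl_congr_mem
  intro count i _
  rw [PySem.List.foldl_if_add_one, PySem.Dict.getD_foldl_insert_add_one,
      PySem.Dict.getD_empty, zero_add, List.count_eq_countP]
  simp [BEq.comm]
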